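-- pv_equiv track=rewrite | github.com/canmengmeng/leetcode | 1411.给-n-x-3-网格图涂色的方案数.py | numOfWays
-- ===== SOURCE A (Python) =====
-- def numOfWays(n: int) -> int:
--     """
--     使用动态规划解决 N x 3 网格图涂色问题。
--
--     核心思想：
--     1. 将每一行的涂色模式分为两类：
--        - 两色模式 (ABA型): 如 红-黄-红。
--        - 三色模式 (ABC型): 如 红-黄-绿。
--
--     2. 定义状态：
--        - two_color_count: 涂到当前行，且当前行为“两色模式”的方案数。
--        - three_color_count: 涂到当前行，且当前行为“三色模式”的方案数。
--
--     3. 状态转移：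
--        我们推导从第 i-1 行到第 i 行，两种模式之间如何转换。
--        - 假设上一行是“两色模式”(ABA)，下一行可以是：
--          - 3种“两色模式” (如 BCB, BAB, CAC)
--          - 2种“三色模式” (如 BAC, CAB)
--        - 假设上一行是“三色模式”(ABC)，下一行可以是：
--          - 2种“两色模式” (如 BAB, BCB)
--          - 2种“三色模式” (如 BCA, CAB)
--
--     4. 状态转移方程：
--        new_two = prev_two * 3 + prev_three * 2
--        new_three = prev_two * 2 + prev_three * 2
--
--     5. 初始状态 (n=1):
--        - 两色模式有 3*2 = 6 种。
--        - 三色模式有 3*2*1 = 6 种。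
--     """
--
--     # 处理 n=0 的边界情况
--     if n == 0:
--         return 0
--
--     # 定义模数
--     MOD = 10**9 + 7
--
--     # 初始化 n=1 的情况
--     # two_color_count: ABA 型方案数
--     # three_color_count: ABC 型方案数
--     two_color_count = 6
--     three_color_count = 6
--
--     # 从 n=2 开始迭代到 n
--     # 循环 n-1 次
--     for _ in range(n - 1):
--         # 临时变量存储上一行的结果
--         prev_two_color_count = two_color_count
--         prev_three_color_count = three_color_count
--
--         # 根据状态转移方程计算当前行的方案数
--         # 当前行是两色模式的方案数
--         two_color_count = (prev_two_color_count * 3 + prev_three_color_count * 2) % MOD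
--
--         # 当前行是三色模式的方案数
--         three_color_count = (prev_two_color_count * 2 + prev_three_color_count * 2) % MOD
--
--     # 最终结果是两种模式方案数之和
--     total_ways = (two_color_count + three_color_count) % MOD
--
--     return total_ways
-- ===== SOURCE B (Python) =====
-- def numOfWays(n: int) -> int:
--     """Matrix exponentiation of the 2-state recurrence: O(log n) instead of O(n)."""
--     if n == 0:
--         return 0
--     MOD = 10**9 + 7
--
--     def mat_mul(x, y):
--         return (
--             (x[0] * y[0] + x[1] * y[2]) % MOD,
--             (x[0] * y[1] + x[1] * y[3]) % MOD,
--             (x[2] * y[0] + x[3] * y[2]) % MOD,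
--             (x[2] * y[1] + x[3] * y[3]) % MOD,
--         )
--
--     # transition matrix [[3, 2], [2, 2]]
--     m = (3, 2, 2, 2)
--     r = (1, 0, 0, 1)
--     e = n - 1
--     while e > 0:
--         if e % 2:
--             r = mat_mul(r, m)
--         m = mat_mul(m, m)
--         e //= 2
--     # initial row vector is (6, 6), so the answer is 6 * (sum of entries)
--     return 6 * (r[0] + r[1] + r[2] + r[3]) % MOD
-- ===== Notes on version B (the rewrite author's own statement) =====
-- stated objective: faster
-- what changed: Replaced the row-by-row DP loop (one linear-recurrence step per row) by binary exponentiation of the two-state transition matrix modulo the prime, reading the answer off the entry sum of the matrix power.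
import Mathlib
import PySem

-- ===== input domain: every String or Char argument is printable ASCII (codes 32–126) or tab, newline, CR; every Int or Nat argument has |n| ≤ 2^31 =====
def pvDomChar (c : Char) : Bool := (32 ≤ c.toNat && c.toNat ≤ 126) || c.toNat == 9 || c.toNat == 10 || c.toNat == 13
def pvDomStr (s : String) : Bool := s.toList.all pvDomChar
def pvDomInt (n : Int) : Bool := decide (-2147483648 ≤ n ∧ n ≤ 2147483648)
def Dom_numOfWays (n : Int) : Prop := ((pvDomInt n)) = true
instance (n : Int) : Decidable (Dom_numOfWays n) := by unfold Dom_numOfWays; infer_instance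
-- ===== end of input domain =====

-- B replaces A's O(n) row-by-row DP loop by binary exponentiation of the 2x2
-- transition matrix mod 10^9+7 (objective: faster, O(log n)).

def pvMOD : Int := 1000000007

-- ===== PORT A =====
-- literal port of A: early return for n == 0, then the DP loop over range(n-1)
def numOfWays (n : Int) : Int :=
  if n == 0 then 0
  else
    let s := (PySem.List.pyRange 0 (n - 1) 1).foldl
      (fun (st : Int × Int) _ =>
        (PySem.Int.mod (st.1 * 3 + st.2 * 2) pvMOD,
         PySem.Int.mod (st.1 * 2 + st.2 * 2) pvMOD))
      (6, 6)
    PySem.Int.mod (s.1 + s.2) pvMOD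

-- ===== PORT B =====
-- Source B's mat_mul on 4-tuples (row-major 2x2 matrices), entries reduced mod 10^9+7
def pvMatMul : Int × Int × Int × Int → Int × Int × Int × Int → Int × Int × Int × Int
  | (a, b, c, d), (e, f, g, h) =>
    (PySem.Int.mod (a * e + b * g) pvMOD, PySem.Int.mod (a * f + b * h) pvMOD,
     PySem.Int.mod (c * e + d * g) pvMOD, PySem.Int.mod (c * f + d * h) pvMOD)

-- Source B's `while e > 0` binary-exponentiation loop, state (r, m, e)
def pvPowLoop (r m : Int × Int × Int × Int) (e : Int) : Int × Int × Int × Int :=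
  if 0 < e then
    pvPowLoop (if PySem.Int.mod e 2 ≠ 0 then pvMatMul r m else r)
      (pvMatMul m m) (PySem.Int.floordiv e 2)
  else r
termination_by e.toNat
decreasing_by
  rename_i he
  rw [PySem.Int.floordiv_eq_ediv_of_pos (by omega)]
  omega

def numOfWays_alt (n : Int) : Int :=
  if n == 0 then 0
  else
    let r := pvPowLoop (1, 0, 0, 1) (3, 2, 2, 2) (n - 1)
    PySem.Int.mod (6 * (r.1 + r.2.1 + r.2.2.1 + r.2.2.2)) pvMOD

-- ===== PRECONDITION & SPEC =====
def Spec_numOfWays (n : Int) (out : Int) : Prop := out = numOfWays_alt n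
instance (n : Int) (out : Int) : Decidable (Spec_numOfWays n out) := by unfold Spec_numOfWays; infer_instance

-- ===== CLAIM (what is proved, stated in full; the proofs are below) =====
def Claim_equal_numOfWays : Prop := ∀ (n : Int), Dom_numOfWays n → Spec_numOfWays n (numOfWays n)

-- ===== LEMMAS AND PROOFS =====

-- cast a 4-tuple matrix to a Mathlib 2x2 matrix over ZMod (10^9+7)
def pvCast (x : Int × Int × Int × Int) : Matrix (Fin 2) (Fin 2) (ZMod 1000000007) :=
  !![(x.1 : ZMod 1000000007), (x.2.1 : ZMod 1000000007);
     (x.2.2.1 : ZMod 1000000007), (x.2.2.2 : ZMod 1000000007)]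

theorem pv_cast_mod (a : Int) :
    (((PySem.Int.mod a pvMOD) : Int) : ZMod 1000000007) = (a : ZMod 1000000007) := by
  rw [PySem.Int.mod_eq_emod_of_pos (by norm_num [pvMOD])]
  have : (pvMOD : Int) = ((1000000007 : ℕ) : Int) := by norm_num [pvMOD]
  rw [this, ZMod.intCast_mod]

theorem pv_cast_mul (x y : Int × Int × Int × Int) :
    pvCast (pvMatMul x y) = pvCast x * pvCast y := by
  obtain ⟨a, b, c, d⟩ := x
  obtain ⟨e, f, g, h⟩ := y
  simp only [pvMatMul, pvCast, Matrix.mul_fin_two, pv_cast_mod]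
  push_cast
  ring_nf

theorem pv_powLoop_cast (r m : Int × Int × Int × Int) (e : Int) :
    pvCast (pvPowLoop r m e) = pvCast r * pvCast m ^ e.toNat := by
  induction r, m, e using pvPowLoop.induct with
  | case1 r m e hpos ih =>
    simp only [dite_eq_ite] at ih
    rw [pvPowLoop, if_pos hpos, ih]
    have hfd : PySem.Int.floordiv e 2 = e / 2 := PySem.Int.floordiv_eq_ediv_of_pos (by omega)
    have hmd : PySem.Int.mod e 2 = e % 2 := PySem.Int.mod_eq_emod_of_pos (by omega)
    by_cases hodd : PySem.Int.mod e 2 ≠ 0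
    · have hk : e.toNat = 2 * (PySem.Int.floordiv e 2).toNat + 1 := by
        rw [hfd]; omega
      rw [if_pos hodd, pv_cast_mul, pv_cast_mul, hk, ← sq, ← pow_mul, mul_assoc, ← pow_succ']
    · have hk : e.toNat = 2 * (PySem.Int.floordiv e 2).toNat := by
        rw [hfd]; omega
      rw [if_neg hodd, pv_cast_mul, hk, ← sq, ← pow_mul]
  | case2 r m e hpos =>
    rw [pvPowLoop, if_neg hpos]
    have : e.toNat = 0 := by omega
    rw [this, pow_zero, mul_one]

def pvM : Matrix (Fin 2) (Fin 2) (ZMod 1000000007) := !![3, 2; 2, 2]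

def pvStep (st : Int × Int) : Int × Int :=
  (PySem.Int.mod (st.1 * 3 + st.2 * 2) pvMOD, PySem.Int.mod (st.1 * 2 + st.2 * 2) pvMOD)

-- any foldl that ignores the list elements is an iterate of length-many steps
theorem pv_foldl_const {α β : Type} (f : α → α) (l : List β) (init : α) :
    l.foldl (fun s _ => f s) init = f^[l.length] init := by
  induction l generalizing init with
  | nil => rfl
  | cons x xs ih => simp [List.foldl_cons, ih, Function.iterate_succ_apply]

-- the DP state after k steps, read through the k-th matrix power
theorem pv_iterate_cast (k : Nat) :
    ((((pvStep^[k] (6, 6)).1 : Int) : ZMod 1000000007),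
     (((pvStep^[k] (6, 6)).2 : Int) : ZMod 1000000007)) =
    (6 * (pvM ^ k) 0 0 + 6 * (pvM ^ k) 1 0, 6 * (pvM ^ k) 0 1 + 6 * (pvM ^ k) 1 1) := by
  induction k with
  | zero => simp [pvM]
  | succ k ih =>
    rw [Function.iterate_succ_apply']
    have h1 := congrArg Prod.fst ih
    have h2 := congrArg Prod.snd ih
    simp only at h1 h2
    simp only [pvStep, pv_cast_mod, Prod.mk.injEq]
    push_cast
    rw [h1, h2, pow_succ]
    refine ⟨?_, ?_⟩ <;>
    · simp [Matrix.mul_apply, Fin.sum_univ_two, pvM]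
      ring

theorem pv_int_eq_of_cast {a b : Int} (ha0 : 0 ≤ a) (ha : a < 1000000007)
    (hb0 : 0 ≤ b) (hb : b < 1000000007)
    (h : (a : ZMod 1000000007) = (b : ZMod 1000000007)) : a = b := by
  have := (ZMod.intCast_eq_intCast_iff' a b 1000000007).mp h
  simp only [Nat.cast_ofNat] at this
  omega

theorem pv_mod_nonneg (a : Int) : 0 ≤ PySem.Int.mod a pvMOD := by
  rw [PySem.Int.mod_eq_emod_of_pos (by norm_num [pvMOD])]
  exact Int.emod_nonneg a (by norm_num [pvMOD])

theorem pv_mod_lt (a : Int) : PySem.Int.mod a pvMOD < 1000000007 := by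
  rw [PySem.Int.mod_eq_emod_of_pos (by norm_num [pvMOD])]
  have := Int.emod_lt_of_pos a (b := pvMOD) (by norm_num [pvMOD])
  simpa [pvMOD] using this

-- ===== VERDICT (by name: the statement is the Claim_ definition above) =====
theorem numOfWays_spec : Claim_equal_numOfWays := by
  intro n _
  unfold Spec_numOfWays numOfWays numOfWays_alt
  by_cases hn : n = 0
  · simp [hn]
  · rw [if_neg (by simpa using hn), if_neg (by simpa using hn)]
    simp only
    apply pv_int_eq_of_cast (pv_mod_nonneg _) (pv_mod_lt _) (pv_mod_nonneg _) (pv_mod_lt _)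
    rw [pv_cast_mod, pv_cast_mod]
    set k : Nat := (n - 1).toNat with hk
    have hfold : (PySem.List.pyRange 0 (n - 1) 1).foldl
        (fun (st : Int × Int) _ =>
          (PySem.Int.mod (st.1 * 3 + st.2 * 2) pvMOD,
           PySem.Int.mod (st.1 * 2 + st.2 * 2) pvMOD)) (6, 6) = pvStep^[k] (6, 6) := by
      show (PySem.List.pyRange 0 (n - 1) 1).foldl (fun st _ => pvStep st) (6, 6) = pvStep^[k] (6, 6)
      rw [pv_foldl_const pvStep]
      congr 1
      rw [PySem.List.length_pyRange_one]
      omega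
    rw [hfold]
    have hpw : pvCast (pvPowLoop (1, 0, 0, 1) (3, 2, 2, 2) (n - 1)) = pvM ^ k := by
      rw [pv_powLoop_cast]
      have h1 : pvCast (1, 0, 0, 1) = 1 := by
        simp [pvCast, Matrix.one_fin_two]
      have h2 : pvCast (3, 2, 2, 2) = pvM := by
        simp [pvCast, pvM]
      rw [h1, h2, one_mul]
    have hit := pv_iterate_cast k
    have h1 := congrArg Prod.fst hit
    have h2 := congrArg Prod.snd hit
    simp only at h1 h2
    have hr1 := congrArg (fun x => x 0 0) hpw
    have hr2 := congrArg (fun x => x 0 1) hpw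
    have hr3 := congrArg (fun x => x 1 0) hpw
    have hr4 := congrArg (fun x => x 1 1) hpw
    simp [pvCast] at hr1 hr2 hr3 hr4
    push_cast
    rw [h1, h2, hr1, hr2, hr3, hr4]
    ring
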